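-- pv_equiv track=rewrite | github.com/jerovernay/Practicas | Parciales/python/Parcial04.py | torneo_de_gallinas
-- ===== SOURCE A (Python) =====
-- def torneo_de_gallinas(estrategias: dict[str, str]) -> dict[str,int]:
--     puntajes = {}
--     jugadores = estrategias.keys()
--
--     for jugador in jugadores:
--         if jugador not in puntajes:
--             puntajes[jugador] = 0               # arranco en 0 todos los jugadores
--
--     listadoGral = estrategias.items()
--
--     for jugador, estrategia in listadoGral:     # itero cada una de los valores, al principio agarro el mismo, pero aclaro que solo suma si no es el mismo. De ahi voy comparando desde el que esta en posicion con todo el resto de jugadores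
--         for jugador2, estrategia2 in listadoGral:
--             if jugador != jugador2:
--                 if estrategia == "me desvio" and estrategia2 == "me desvio":
--                     puntajes[jugador] -= 10
--                 elif estrategia == "me desvio" and estrategia2 == "me la banco":
--                     puntajes[jugador] -= 15
--                 elif estrategia == "me la banco" and estrategia2 == "me desvio":
--                     puntajes[jugador] += 10
--                 elif estrategia == "me la banco" and estrategia2 == "me la banco":
--                     puntajes[jugador] -= 5
--
--     return puntajes
-- ===== SOURCE B (Python) =====
-- def torneo_de_gallinas(estrategias: dict[str, str]) -> dict[str, int]:
--     # One pass of counting, then a closed-form score per player (O(n) vs A's O(n^2)).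
--     valores = list(estrategias.values())
--     desvios = valores.count("me desvio")
--     bancos = valores.count("me la banco")
--     puntajes = {}
--     for jugador, estrategia in estrategias.items():
--         if estrategia == "me desvio":
--             puntajes[jugador] = -10 * (desvios - 1) - 15 * bancos
--         elif estrategia == "me la banco":
--             puntajes[jugador] = 10 * desvios - 5 * (bancos - 1)
--         else:
--             puntajes[jugador] = 0
--     return puntajes
-- ===== Notes on version B (the rewrite author's own statement) =====
-- stated objective: faster
-- what changed: Replaces A's all-pairs double loop over the players by a single counting pass ('me desvio'/'me la banco' totals) and a closed-form score per player from those counts.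
import Mathlib
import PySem

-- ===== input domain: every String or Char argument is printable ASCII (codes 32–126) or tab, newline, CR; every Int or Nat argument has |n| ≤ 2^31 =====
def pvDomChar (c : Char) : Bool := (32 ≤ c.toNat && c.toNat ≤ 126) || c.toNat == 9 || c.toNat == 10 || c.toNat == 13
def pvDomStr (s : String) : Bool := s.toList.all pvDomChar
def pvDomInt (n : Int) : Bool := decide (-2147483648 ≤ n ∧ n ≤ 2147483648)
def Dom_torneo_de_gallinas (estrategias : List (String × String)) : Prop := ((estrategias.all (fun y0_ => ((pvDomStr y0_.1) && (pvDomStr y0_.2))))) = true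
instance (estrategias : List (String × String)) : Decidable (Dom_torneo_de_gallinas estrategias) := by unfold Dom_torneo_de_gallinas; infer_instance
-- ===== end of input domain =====

-- B replaces A's all-pairs O(n^2) comparison by one counting pass and a closed-form score per player (objective: faster).


-- ===== PORT A =====
def torneo_de_gallinas (estrategias : List (String × String)) : List (String × Int) :=
  let puntajes : PySem.Dict String Int :=
    estrategias.foldl (fun d j => if d.contains j.1 then d else d.insert j.1 0) PySem.Dict.empty
  let puntajes :=
    estrategias.foldl (fun d p =>
      estrategias.foldl (fun d2 q =>
        if p.1 ≠ q.1 then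
          if p.2 = "me desvio" ∧ q.2 = "me desvio" then d2.modify p.1 0 (fun x => x - 10)
          else if p.2 = "me desvio" ∧ q.2 = "me la banco" then d2.modify p.1 0 (fun x => x - 15)
          else if p.2 = "me la banco" ∧ q.2 = "me desvio" then d2.modify p.1 0 (fun x => x + 10)
          else if p.2 = "me la banco" ∧ q.2 = "me la banco" then d2.modify p.1 0 (fun x => x - 5)
          else d2
        else d2) d) puntajes
  puntajes.items

-- ===== PORT B =====
def torneo_de_gallinas_alt (estrategias : List (String × String)) : List (String × Int) :=
  let valores := estrategias.map Prod.snd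
  let desvios : Int := PySem.List.count valores "me desvio"
  let bancos : Int := PySem.List.count valores "me la banco"
  let puntajes : PySem.Dict String Int :=
    estrategias.foldl (fun r p =>
      r.insert p.1 (if p.2 = "me desvio" then -10 * (desvios - 1) - 15 * bancos
        else if p.2 = "me la banco" then 10 * desvios - 5 * (bancos - 1)
        else 0)) PySem.Dict.empty
  puntajes.items

-- ===== PRECONDITION & SPEC =====
-- Pre_ excludes association lists with duplicate keys: A's parameter is a Python dict[str, str], whose
-- keys are unique, so such lists do not represent any input A can be called on.
def Pre_torneo_de_gallinas (estrategias : List (String × String)) : Prop :=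
  (estrategias.map Prod.fst).Nodup
instance (estrategias : List (String × String)) : Decidable (Pre_torneo_de_gallinas estrategias) := by
  unfold Pre_torneo_de_gallinas; infer_instance
def pvWitness_torneo_de_gallinas : (List (String × String)) :=
  [("ana", "me desvio"), ("bob", "me la banco"), ("eva", "paso")]
def Spec_torneo_de_gallinas (estrategias : List (String × String)) (out : List (String × Int)) : Prop := out = torneo_de_gallinas_alt estrategias
instance (estrategias : List (String × String)) (out : List (String × Int)) : Decidable (Spec_torneo_de_gallinas estrategias out) := by unfold Spec_torneo_de_gallinas; infer_instance

-- ===== CLAIM (what is proved, stated in full; the proofs are below) =====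
def Claim_equal_torneo_de_gallinas : Prop := ∀ (estrategias : List (String × String)), Dom_torneo_de_gallinas estrategias → Pre_torneo_de_gallinas estrategias → Spec_torneo_de_gallinas estrategias (torneo_de_gallinas estrategias)

-- ===== LEMMAS AND PROOFS =====

-- payoff of strategy e1 against e2 (A's branch table)
def tabla (e1 e2 : String) : Int :=
  if e1 = "me desvio" ∧ e2 = "me desvio" then -10
  else if e1 = "me desvio" ∧ e2 = "me la banco" then -15
  else if e1 = "me la banco" ∧ e2 = "me desvio" then 10
  else if e1 = "me la banco" ∧ e2 = "me la banco" then -5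
  else 0

-- what one inner iteration of A adds to puntajes[p.1]
def contrib (p q : String × String) : Int := if p.1 = q.1 then 0 else tabla p.2 q.2

lemma fst_inj {es : List (String × String)} (hn : (es.map Prod.fst).Nodup)
    {p q : String × String} (hp : p ∈ es) (hq : q ∈ es) (h : p.1 = q.1) : p = q :=
  List.inj_on_of_nodup_map hn hp hq h

lemma items_of_init (l : List (String × String)) (d : PySem.Dict String Int)
    (hf : ∀ p ∈ l, d.contains p.1 = false) (hn : (l.map Prod.fst).Nodup) :
    (l.foldl (fun d j => if d.contains j.1 then d else d.insert j.1 0) d).items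
      = d.items ++ l.map (fun p => (p.1, (0 : Int))) := by
  induction l generalizing d with
  | nil => simp
  | cons p l ih =>
    simp only [List.map_cons, List.nodup_cons] at hn
    have hfp : d.contains p.1 = false := hf p (by simp)
    simp only [List.foldl_cons, hfp, if_neg Bool.false_ne_true]
    rw [ih]
    · rw [PySem.Dict.items_insert_of_not_contains d 0 hfp]; simp
    · intro q hq
      rw [PySem.Dict.contains_insert]
      have : q.1 ≠ p.1 := by
        intro h
        exact hn.1 (h ▸ List.mem_map_of_mem hq)
      simp [this, hf q (by simp [hq])]
    · exact hn.2

lemma modify_map (es : List (String × String)) (g : (String × String) → Int)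
    (p : String × String) (hn : (es.map Prod.fst).Nodup) (hp : p ∈ es) (f : Int → Int) :
    (PySem.Dict.mk (es.map (fun q => (q.1, g q)))).modify p.1 0 f
      = PySem.Dict.mk (es.map (fun q => (q.1, if q.1 = p.1 then f (g q) else g q))) := by
  have hkeys : (PySem.Dict.mk (es.map (fun q => (q.1, g q)))).keys = es.map Prod.fst := by
    rw [PySem.Dict.keys_mk]; simp
  have hmem : (p.1, g p) ∈ (PySem.Dict.mk (es.map (fun q => (q.1, g q)))).items :=
    List.mem_map_of_mem hp
  have hcont : (PySem.Dict.mk (es.map (fun q => (q.1, g q)))).contains p.1 = true := by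
    rw [PySem.Dict.contains_iff_mem_keys, hkeys]; exact List.mem_map_of_mem hp
  have hget : (PySem.Dict.mk (es.map (fun q => (q.1, g q)))).getD p.1 0 = g p :=
    PySem.Dict.getD_of_mem_items _ hmem (hkeys ▸ hn) 0
  show (PySem.Dict.mk (es.map (fun q => (q.1, g q)))).insert p.1
      (f ((PySem.Dict.mk (es.map (fun q => (q.1, g q)))).getD p.1 0)) = _
  apply PySem.Dict.ext
  rw [PySem.Dict.items_insert_of_contains _ _ hcont, hget]
  rw [List.map_map]
  apply List.map_congr_left
  intro q hq
  by_cases h : q.1 = p.1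
  · have : q = p := fst_inj hn hq hp h
    subst this
    simp
  · simp [Function.comp, h]

lemma inner_fold (es : List (String × String)) (p : String × String)
    (hn : (es.map Prod.fst).Nodup) (hp : p ∈ es) :
    ∀ (l : List (String × String)) (g : (String × String) → Int),
    (l.foldl (fun d2 q =>
        if p.1 ≠ q.1 then
          if p.2 = "me desvio" ∧ q.2 = "me desvio" then d2.modify p.1 0 (fun x => x - 10)
          else if p.2 = "me desvio" ∧ q.2 = "me la banco" then d2.modify p.1 0 (fun x => x - 15)
          else if p.2 = "me la banco" ∧ q.2 = "me desvio" then d2.modify p.1 0 (fun x => x + 10)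
          else if p.2 = "me la banco" ∧ q.2 = "me la banco" then d2.modify p.1 0 (fun x => x - 5)
          else d2
        else d2)
      (PySem.Dict.mk (es.map (fun q => (q.1, g q)))))
    = PySem.Dict.mk (es.map (fun r =>
        (r.1, if r.1 = p.1 then g r + (l.map (contrib p)).sum else g r))) := by
  intro l
  induction l with
  | nil =>
    intro g; simp only [List.foldl_nil, List.map_nil, List.sum_nil]
    congr 1; apply List.map_congr_left; intro r _; by_cases h : r.1 = p.1 <;> simp [h]
  | cons q l ih =>
    intro g
    simp only [List.foldl_cons, List.map_cons, List.sum_cons]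
    by_cases hne : p.1 ≠ q.1
    · have hc : contrib p q = tabla p.2 q.2 := by simp [contrib, fun h => hne h]
      simp only [if_pos hne]
      -- each branch is either a modify (rewritten by modify_map) or a no-op with tabla = 0
      by_cases h1 : p.2 = "me desvio" ∧ q.2 = "me desvio"
      · rw [if_pos h1, modify_map es g p hn hp, ih]
        congr 1; apply List.map_congr_left; intro r _
        by_cases h : r.1 = p.1 <;> simp [h, hc, tabla, h1] <;> ring
      · rw [if_neg h1]
        by_cases h2 : p.2 = "me desvio" ∧ q.2 = "me la banco"
        · rw [if_pos h2, modify_map es g p hn hp, ih]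
          congr 1; apply List.map_congr_left; intro r _
          by_cases h : r.1 = p.1 <;> simp [h, hc, tabla, h2] <;> ring
        · rw [if_neg h2]
          by_cases h3 : p.2 = "me la banco" ∧ q.2 = "me desvio"
          · rw [if_pos h3, modify_map es g p hn hp, ih]
            congr 1; apply List.map_congr_left; intro r _
            by_cases h : r.1 = p.1 <;> simp [h, hc, tabla, h3] <;> ring
          · rw [if_neg h3]
            by_cases h4 : p.2 = "me la banco" ∧ q.2 = "me la banco"
            · rw [if_pos h4, modify_map es g p hn hp, ih]
              congr 1; apply List.map_congr_left; intro r _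
              by_cases h : r.1 = p.1 <;> simp [h, hc, tabla, h4] <;> ring
            · rw [if_neg h4, ih]
              have hz : contrib p q = 0 := by simp [hc, tabla, h1, h2, h3, h4]
              congr 1; apply List.map_congr_left; intro r _
              by_cases h : r.1 = p.1 <;> simp [h, hz]
    · simp only [if_neg hne, ih]
      have hz : contrib p q = 0 := by
        rw [not_not] at hne; simp [contrib, hne]
      congr 1; apply List.map_congr_left; intro r _
      by_cases h : r.1 = p.1 <;> simp [h, hz]

def S (es : List (String × String)) (p : String × String) : Int := (es.map (contrib p)).sum

lemma outer_fold (es : List (String × String)) (hn : (es.map Prod.fst).Nodup) :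
    ∀ (l : List (String × String)) (g : (String × String) → Int), (∀ p ∈ l, p ∈ es) →
    (l.foldl (fun d p =>
        es.foldl (fun d2 q =>
          if p.1 ≠ q.1 then
            if p.2 = "me desvio" ∧ q.2 = "me desvio" then d2.modify p.1 0 (fun x => x - 10)
            else if p.2 = "me desvio" ∧ q.2 = "me la banco" then d2.modify p.1 0 (fun x => x - 15)
            else if p.2 = "me la banco" ∧ q.2 = "me desvio" then d2.modify p.1 0 (fun x => x + 10)
            else if p.2 = "me la banco" ∧ q.2 = "me la banco" then d2.modify p.1 0 (fun x => x - 5)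
            else d2
          else d2) d)
      (PySem.Dict.mk (es.map (fun q => (q.1, g q)))))
    = PySem.Dict.mk (es.map (fun q => (q.1, g q + (l.count q : Int) * S es q))) := by
  intro l
  induction l with
  | nil =>
    intro g _; simp only [List.foldl_nil, List.count_nil]
    congr 1; apply List.map_congr_left; intro r _; simp
  | cons p l ih =>
    intro g hl
    have hp : p ∈ es := hl p (by simp)
    simp only [List.foldl_cons]
    rw [inner_fold es p hn hp es g, ih _ (fun q hq => hl q (by simp [hq]))]
    congr 1; apply List.map_congr_left; intro q hq
    by_cases h : q = p
    · subst h
      simp only [List.count_cons, BEq.rfl, if_true]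
      push_cast
      show _ = (_, _)
      congr 1
      unfold S
      ring
    · have hq1 : ¬ q.1 = p.1 := fun hh => h (fst_inj hn hq hp hh)
      have hqp : (p == q) = false := by
        simp only [beq_eq_false_iff_ne]; exact fun hh => h hh.symm
      simp [hq1, List.count_cons, hqp]

lemma sum_tabla_desvio (vs : List String) :
    (vs.map (tabla "me desvio")).sum
      = -10 * (vs.count "me desvio" : Int) - 15 * (vs.count "me la banco" : Int) := by
  induction vs with
  | nil => simp
  | cons v vs ih =>
    simp only [List.map_cons, List.sum_cons, List.count_cons, ih]
    by_cases h1 : v = "me desvio"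
    · subst h1; simp [tabla]; ring
    · by_cases h2 : v = "me la banco"
      · subst h2; simp [tabla]; ring
      · have b1 : ("me desvio" == v) = false := by simp [Ne.symm h1]
        have b2 : ("me la banco" == v) = false := by simp [Ne.symm h2]
        simp [tabla, h1, h2]

lemma sum_tabla_banco (vs : List String) :
    (vs.map (tabla "me la banco")).sum
      = 10 * (vs.count "me desvio" : Int) - 5 * (vs.count "me la banco" : Int) := by
  induction vs with
  | nil => simp
  | cons v vs ih =>
    simp only [List.map_cons, List.sum_cons, List.count_cons, ih]
    by_cases h1 : v = "me desvio"
    · subst h1; simp [tabla]; ring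
    · by_cases h2 : v = "me la banco"
      · subst h2; simp [tabla]; ring
      · have b1 : ("me desvio" == v) = false := by simp [Ne.symm h1]
        have b2 : ("me la banco" == v) = false := by simp [Ne.symm h2]
        simp [tabla, h1, h2]

lemma tabla_other (e x : String) (h1 : e ≠ "me desvio") (h2 : e ≠ "me la banco") :
    tabla e x = 0 := by simp [tabla, h1, h2]

lemma sum_contrib (p : String × String) :
    ∀ (es : List (String × String)), (es.map Prod.fst).Nodup → p ∈ es →
    S es p = (es.map (fun q => tabla p.2 q.2)).sum - tabla p.2 p.2 := by
  intro es
  induction es with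
  | nil => intro _ h; simp at h
  | cons a es ih =>
    intro hn hp
    simp only [List.map_cons, List.nodup_cons] at hn
    unfold S at *
    simp only [List.map_cons, List.sum_cons]
    rcases List.mem_cons.mp hp with h | h
    · subst h
      have hz : contrib p p = 0 := by simp [contrib]
      have hrest : es.map (contrib p) = es.map (fun q => tabla p.2 q.2) := by
        apply List.map_congr_left
        intro q hq
        have : ¬ p.1 = q.1 := fun hh => hn.1 (hh ▸ List.mem_map_of_mem hq)
        simp [contrib, this]
      rw [hz, hrest]; ring
    · have ha : ¬ p.1 = a.1 := by
        intro hh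
        exact hn.1 (hh ▸ List.mem_map_of_mem h)
      have hca : contrib p a = tabla p.2 a.2 := by simp [contrib, ha]
      rw [hca, ih hn.2 h]; ring

-- ===== VERDICT (by name: the statement is the Claim_ definition above) =====
theorem torneo_de_gallinas_spec : Claim_equal_torneo_de_gallinas := by
  intro es _ hpre
  unfold Pre_torneo_de_gallinas at hpre
  show torneo_de_gallinas es = torneo_de_gallinas_alt es
  have hnd : es.Nodup := hpre.of_map
  -- A's value
  have h0 : (es.foldl (fun d j => if d.contains j.1 then d else d.insert j.1 0) PySem.Dict.empty)
      = PySem.Dict.mk (es.map (fun q => (q.1, (fun _ => (0 : Int)) q))) := by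
    apply PySem.Dict.ext
    rw [items_of_init es PySem.Dict.empty (fun p _ => by simp [pysem]) hpre]
    simp [PySem.Dict.empty]
  have hA : torneo_de_gallinas es
      = es.map (fun q => (q.1, (0 : Int) + (es.count q : Int) * S es q)) := by
    unfold torneo_de_gallinas
    dsimp only
    rw [h0, outer_fold es hpre es (fun _ => (0 : Int)) (fun p hp => hp)]
  -- B's value
  have hB : torneo_de_gallinas_alt es
      = es.map (fun p => (p.1,
          if p.2 = "me desvio" then
            -10 * ((PySem.List.count (es.map Prod.snd) "me desvio" : Int) - 1)
              - 15 * (PySem.List.count (es.map Prod.snd) "me la banco" : Int)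
          else if p.2 = "me la banco" then
            10 * (PySem.List.count (es.map Prod.snd) "me desvio" : Int)
              - 5 * ((PySem.List.count (es.map Prod.snd) "me la banco" : Int) - 1)
          else 0)) := by
    unfold torneo_de_gallinas_alt
    dsimp only
    rw [PySem.Dict.items_foldl_insert_fresh es (fun p => p.1) _ PySem.Dict.empty
      (fun a _ => by simp [pysem]) hpre]
    simp [PySem.Dict.empty]
  rw [hA, hB]
  apply List.map_congr_left
  intro p hp
  have hcount : es.count p = 1 := List.count_eq_one_of_mem hnd hp
  have hS := sum_contrib p es hpre hp
  have hcv : ∀ s : String, PySem.List.count (es.map Prod.snd) s = (es.map Prod.snd).count s :=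
    fun _ => rfl
  have hmm : ∀ e : String, es.map (fun q => tabla e q.2) = (es.map Prod.snd).map (tabla e) := by
    intro e; rw [List.map_map]; rfl
  congr 1
  rw [hcount, hS]
  by_cases h1 : p.2 = "me desvio"
  · rw [if_pos h1, h1, hmm, sum_tabla_desvio, hcv, hcv]
    have : tabla "me desvio" "me desvio" = -10 := by simp [tabla]
    rw [this]; push_cast; ring
  · rw [if_neg h1]
    by_cases h2 : p.2 = "me la banco"
    · rw [if_pos h2, h2, hmm, sum_tabla_banco, hcv, hcv]
      have : tabla "me la banco" "me la banco" = -5 := by simp [tabla]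
      rw [this]; push_cast; ring
    · rw [if_neg h2]
      have hz : ∀ q ∈ es, tabla p.2 q.2 = 0 := fun q _ => tabla_other p.2 q.2 h1 h2
      rw [List.map_congr_left hz, tabla_other p.2 p.2 h1 h2]
      simp
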